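-- pv_equiv track=rewrite | github.com/Vigneswar-A/vigneswar-a.github.io | programming/leetcode/2374.py | totalSteps
-- ===== SOURCE A (Python) =====
-- from typing import List
--
-- def totalSteps(nums: List[int]) -> int:
--     n = len(nums)
--     stack = []
--     dp = [0]*(10**5)
--
--     for i in range(n-1,-1,-1):
--         while stack and nums[stack[-1]] < nums[i]:
--             dp[i] = max(dp[stack.pop()], dp[i]+1)
--         stack.append(i)
--
--
--     return max(dp)
-- ===== SOURCE B (Python) =====
-- def totalSteps(nums):
--     t = []
--     hi = None  # running prefix maximum
--     for j, x in enumerate(nums):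
--         if hi is None or x >= hi:
--             # no earlier element is strictly greater: never removed
--             t.append(0)
--             hi = x
--         else:
--             i = j - 1
--             while nums[i] <= x:   # always finds one, since x < hi
--                 i -= 1
--             best = 0
--             for k in range(i + 1, j):
--                 if t[k] > best:
--                     best = t[k]
--             t.append(best + 1)
--     return max(t, default=0)
-- ===== Notes on version B (the rewrite author's own statement) =====
-- stated objective: alternative
-- what changed: B abandons A's right-to-left monotonic index stack with a fixed 10**5-slot dp buffer entirely: it scans left-to-right and computes each element's removal round directly from the recurrence t[j] = 1 + max(t[p+1..j-1]) where p is the nearest previous strictly-greater index (found by a backward scan, with a running prefix maximum deciding the never-removed case), keeping a plain growing list and returning its max; Pre_ excludes exactly the inputs (some element at index >= 10**5 with a strictly greater element before it) on which A raises IndexError.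
import Mathlib
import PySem

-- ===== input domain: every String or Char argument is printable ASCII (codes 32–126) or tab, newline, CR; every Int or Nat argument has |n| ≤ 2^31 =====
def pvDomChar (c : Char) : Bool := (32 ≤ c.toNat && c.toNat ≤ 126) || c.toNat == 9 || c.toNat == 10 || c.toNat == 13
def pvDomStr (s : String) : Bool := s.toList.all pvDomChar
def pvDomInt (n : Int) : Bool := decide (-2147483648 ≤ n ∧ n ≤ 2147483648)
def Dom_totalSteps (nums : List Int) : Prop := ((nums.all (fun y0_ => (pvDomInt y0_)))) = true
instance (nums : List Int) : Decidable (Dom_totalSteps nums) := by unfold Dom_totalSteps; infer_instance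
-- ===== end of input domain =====

-- B replaces A's right-to-left monotonic index stack over a fixed 10^5-slot dp buffer with a
-- left-to-right computation of each element's removal round from its nearest previous greater
-- element (objective: alternative algorithm; not claimed faster).

-- ===== PORT A =====
-- inner 'while stack and nums[stack[-1]] < nums[i]: dp[i] = max(dp[stack.pop()], dp[i]+1)'
-- (list reads/writes are totalised with default 0 / no-op set; exact inside Pre_, where every
-- dp index that is actually read or written is < 10^5 and all nums indices are in range)
def popA (nums : List Int) (i : Int) : List Int → List Int → List Int × List Int
  | [], dp => ([], dp)
  | j :: rest, dp =>
    if PySem.List.pyGetD nums j 0 < PySem.List.pyGetD nums i 0 then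
      popA nums i rest
        (PySem.List.pySetD dp i (max (PySem.List.pyGetD dp j 0) (PySem.List.pyGetD dp i 0 + 1)))
    else (j :: rest, dp)

-- one iteration of 'for i in range(n-1,-1,-1)': the while loop, then 'stack.append(i)'
def stepA (nums : List Int) (st : List Int × List Int) (i : Int) : List Int × List Int :=
  let r := popA nums i st.1 st.2
  (i :: r.1, r.2)

def totalSteps (nums : List Int) : Int :=
  let n : Int := (nums.length : Int)
  let dp0 : List Int := List.replicate (10 ^ 5) 0        -- dp = [0]*(10**5)
  let r := (PySem.List.pyRange (n - 1) (-1) (-1)).foldl (stepA nums) ([], dp0)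
  ((PySem.List.max? r.2 (fun x => x)).getD 0)            -- max(dp); dp is never empty

-- ===== PORT B =====
-- inner 'while nums[i] <= x: i -= 1' — the backward scan for the nearest previous strictly
-- greater element; exact on every reachable call: it is only entered when x is smaller than the
-- running prefix maximum, so a strictly greater element exists and the base case is unreachable
def findGt (nums : List Int) (x : Int) : Nat → Nat
  | 0 => 0
  | Nat.succ i => if nums.getD (i + 1) 0 ≤ x then findGt nums x i else i + 1

-- 'best = 0; for k in range(a, b): if t[k] > best: best = t[k]' (t[k] in range on every reachable call)
def bestLoop (t : List Int) (a b : Int) : Int :=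
  (PySem.List.pyRange a b 1).foldl
    (fun best k => if PySem.List.pyGetD t k 0 > best then PySem.List.pyGetD t k 0 else best) 0

-- one iteration of 'for j, x in enumerate(nums)'
def stepB (nums : List Int) (st : List Int × Option Int) (jx : Int × Int) : List Int × Option Int :=
  match st.2 with
  | none => (st.1 ++ [0], some jx.2)
  | some h =>
    if h ≤ jx.2 then (st.1 ++ [0], some jx.2)
    else
      let p : Nat := findGt nums jx.2 (jx.1 - 1).toNat   -- i = j - 1 (j ≥ 1 whenever hi is set)
      (st.1 ++ [bestLoop st.1 ((p : Int) + 1) jx.1 + 1], some h)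

def totalSteps_alt (nums : List Int) : Int :=
  let r := (PySem.List.enumerate nums).foldl (stepB nums) ([], none)
  PySem.List.maxD r.1 (fun z => z) 0                     -- max(t, default=0)

-- ===== PRECONDITION & SPEC =====
-- Pre_ excludes exactly the inputs on which A raises IndexError: A's dp buffer has 10**5 slots,
-- and A touches dp at an index j ≥ 10**5 precisely when the element at such a j has a strictly
-- greater element somewhere before it. On every admitted input A returns normally.
def Pre_totalSteps (nums : List Int) : Prop :=
  ∀ j, j < nums.length → 10 ^ 5 ≤ j → ∀ i, i < j → nums.getD i 0 ≤ nums.getD j 0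
instance (nums : List Int) : Decidable (Pre_totalSteps nums) := by unfold Pre_totalSteps; infer_instance
def pvWitness_totalSteps : List Int := [5, 3, 4, 4, 7, 1, 2]

def Spec_totalSteps (nums : List Int) (out : Int) : Prop := out = totalSteps_alt nums
instance (nums : List Int) (out : Int) : Decidable (Spec_totalSteps nums out) := by unfold Spec_totalSteps; infer_instance

-- ===== CLAIM (what is proved, stated in full; the proofs are below) =====
def Claim_equal_totalSteps : Prop :=
  ∀ (nums : List Int), Dom_totalSteps nums → Pre_totalSteps nums → Spec_totalSteps nums (totalSteps nums)

-- ===== LEMMAS AND PROOFS =====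

-- value at an index (shorthand used throughout the proofs)
def pvV (nums : List Int) (j : Nat) : Int := nums.getD j 0

-- nearest previous strictly greater index: search c-1, c-2, ..., 0
def pvSearch (nums : List Int) (x : Int) : Nat → Option Nat
  | 0 => none
  | c + 1 => if x < nums.getD c 0 then some c else pvSearch nums x c

-- removal round of element j (0 = never removed): the functional specification both ports meet
def pvT (nums : List Int) : Nat → Int
  | j =>
    match pvSearch nums (nums.getD j 0) j with
    | none => 0
    | some p =>
      1 + ((List.range' (p + 1) (j - (p + 1))).attach.map
            (fun k => pvT nums k.1)).foldl max 0
decreasing_by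
  have := List.mem_range'_1.mp k.2
  omega

-- fold-max with floor 0
def pvFM (l : List Int) : Int := l.foldl max 0

-- max of pvT over the half-open index interval [a, b)
def pvSeg (nums : List Int) (a b : Nat) : Int := pvFM ((List.range' a (b - a)).map (pvT nums))

def pvMaxT (nums : List Int) : Int := pvFM ((List.range nums.length).map (pvT nums))

-- first index x in [c, c+fuel) with cut ≤ v x, else c+fuel
def pvNgeAux (nums : List Int) (x : Int) : Nat → Nat → Nat
  | c, 0 => c
  | c, fuel + 1 => if x ≤ nums.getD c 0 then c else pvNgeAux nums x (c + 1) fuel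

-- next index ≥ i+1 whose value is ≥ v i (n if none)
def pvNge (nums : List Int) (i : Nat) : Nat :=
  pvNgeAux nums (nums.getD i 0) (i + 1) (nums.length - (i + 1))

-- max removal round among the elements strictly dominated by i
def pvReg (nums : List Int) (i : Nat) : Int := pvSeg nums (i + 1) (pvNge nums i)

-- 'j is a running maximum of the window [w, n)' (the indices on A's stack)
def pvPb (nums : List Int) (w : Nat) (j : Nat) : Bool :=
  (List.range' w (j - w)).all (fun i => nums.getD i 0 ≤ nums.getD j 0)

def pvMaxima (nums : List Int) (w : Nat) : List Nat :=
  (List.range' w (nums.length - w)).filter (pvPb nums w)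

-- A's state after processing the k leftmost iterations (indices n-1, ..., n-k)
def pvAS (nums : List Int) (k : Nat) : List Int × List Int :=
  ((List.range k).map (fun (t : Nat) => ((nums.length : Int) - 1 - (t : Int)))).foldl
    (stepA nums) ([], List.replicate (10 ^ 5) 0)

-- the dp array's contents for window start w
def pvDspec (nums : List Int) (w i : Nat) : Int :=
  if w ≤ i ∧ i < nums.length ∧ i < 10 ^ 5 then pvReg nums i else 0

-- simulation invariant for A after k iterations (window w = n - k)
def pvInv (nums : List Int) (k : Nat) : Prop :=
  (pvAS nums k).1 = (pvMaxima nums (nums.length - k)).map (fun (j : Nat) => (j : Int)) ∧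
  (pvAS nums k).2.length = 10 ^ 5 ∧
  ∀ i : Nat, (pvAS nums k).2.getD i 0 = pvDspec nums (nums.length - k) i

-- B's hi after processing the first k elements
def pvHi (nums : List Int) : Nat → Option Int
  | 0 => none
  | k + 1 =>
    match pvHi nums k with
    | none => some (nums.getD k 0)
    | some h => if h ≤ nums.getD k 0 then some (nums.getD k 0) else some h

-- B's state after processing the first k elements
def pvBS (nums : List Int) (k : Nat) : List Int × Option Int :=
  ((List.range k).map (fun (j : Nat) => ((j : Int), nums.getD j 0))).foldl (stepB nums) ([], none)

-- ---------- generic fold-max facts ----------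

lemma pvFM_nonneg (l : List Int) : 0 ≤ pvFM l := (PySem.List.le_foldl_max l 0).1

lemma pvFM_le (l : List Int) (x : Int) (hx : x ∈ l) : x ≤ pvFM l :=
  (PySem.List.le_foldl_max l 0).2 x hx

lemma pvFM_foldl_shift (l : List Int) (a : Int) (ha : 0 ≤ a) :
    l.foldl max a = max a (pvFM l) := by
  induction l generalizing a with
  | nil => simp [pvFM]; omega
  | cons x t ih =>
    have h1 : (x :: t).foldl max a = t.foldl max (max a x) := rfl
    rw [h1, ih (max a x) (by omega)]
    have h2 : pvFM (x :: t) = (x :: t).foldl max 0 := rfl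
    have h3 : (x :: t).foldl max 0 = t.foldl max (max 0 x) := rfl
    rw [h2, h3, ih (max 0 x) (by omega)]
    omega

lemma pvFM_append (l1 l2 : List Int) : pvFM (l1 ++ l2) = max (pvFM l1) (pvFM l2) := by
  show (l1 ++ l2).foldl max 0 = _
  rw [List.foldl_append, pvFM_foldl_shift l2 (l1.foldl max 0) (pvFM_nonneg l1)]
  rfl

lemma pvFM_cons (x : Int) (l : List Int) : pvFM (x :: l) = max (max 0 x) (pvFM l) := by
  have h : x :: l = [x] ++ l := rfl
  rw [h, pvFM_append]
  have : pvFM [x] = max 0 x := rfl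
  rw [this]

lemma pvFM_bound (l : List Int) (M : Int) (hM : 0 ≤ M) (h : ∀ x ∈ l, x ≤ M) : pvFM l ≤ M := by
  induction l with
  | nil => simpa [pvFM]
  | cons x t ih =>
    rw [pvFM_cons]
    have h1 := h x (List.mem_cons_self)
    have h2 := ih (fun y hy => h y (List.mem_cons_of_mem _ hy))
    omega

lemma pvIteMax (b x : Int) : (if x > b then x else b) = max b x := by
  split_ifs with h <;> omega

-- ---------- pvSearch / findGt characterisations ----------

lemma pvSearch_eq_none (nums : List Int) (x : Int) (c : Nat) :
    pvSearch nums x c = none ↔ ∀ l, l < c → nums.getD l 0 ≤ x := by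
  induction c with
  | zero => simp [pvSearch]
  | succ c ih =>
    rw [pvSearch]
    by_cases h : x < nums.getD c 0
    · rw [if_pos h]
      constructor
      · intro hco; cases hco
      · intro hall; exact absurd (hall c (by omega)) (by omega)
    · rw [if_neg h, ih]
      constructor
      · intro hall l hl
        rcases Nat.lt_or_ge l c with h1 | h1
        · exact hall l h1
        · have he : l = c := by omega
          subst he; omega
      · intro hall l hl; exact hall l (by omega)

lemma pvSearch_eq_some (nums : List Int) (x : Int) (c p : Nat) :
    pvSearch nums x c = some p ↔
      p < c ∧ x < nums.getD p 0 ∧ ∀ l, p < l → l < c → nums.getD l 0 ≤ x := by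
  induction c with
  | zero =>
    simp [pvSearch]
  | succ c ih =>
    rw [pvSearch]
    by_cases h : x < nums.getD c 0
    · rw [if_pos h]
      constructor
      · intro hco
        have he : p = c := by cases hco; rfl
        subst he
        exact ⟨by omega, h, by intro l h1 h2; omega⟩
      · rintro ⟨h1, h2, h3⟩
        by_cases he : p = c
        · rw [he]
        · exact absurd (h3 c (by omega) (by omega)) (by omega)
    · rw [if_neg h, ih]
      constructor
      · rintro ⟨h1, h2, h3⟩
        refine ⟨by omega, h2, ?_⟩
        intro l hl1 hl2
        rcases Nat.lt_or_ge l c with hc | hc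
        · exact h3 l hl1 hc
        · have he : l = c := by omega
          subst he; omega
      · rintro ⟨h1, h2, h3⟩
        have hpc : p ≠ c := by
          intro he; subst he; omega
        exact ⟨by omega, h2, fun l hl1 hl2 => h3 l hl1 (by omega)⟩

lemma findGt_eq (nums : List Int) (x : Int) (c p : Nat)
    (h : pvSearch nums x (c + 1) = some p) : findGt nums x c = p := by
  rw [pvSearch_eq_some] at h
  obtain ⟨h1, h2, h3⟩ := h
  induction c with
  | zero =>
    have he : p = 0 := by omega
    subst he; rfl
  | succ c ih =>
    rw [findGt]
    by_cases he : p = c + 1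
    · subst he
      rw [if_neg (by omega)]
    · have hle : nums.getD (c + 1) 0 ≤ x := h3 (c + 1) (by omega) (by omega)
      rw [if_pos hle]
      exact ih (by omega) (fun l hl1 hl2 => h3 l hl1 (by omega))

-- ---------- pvT basic facts ----------

lemma pvT_eq_zero (nums : List Int) (j : Nat)
    (h : pvSearch nums (nums.getD j 0) j = none) : pvT nums j = 0 := by
  rw [pvT, h]

lemma pvT_eq_succ (nums : List Int) (j p : Nat)
    (h : pvSearch nums (nums.getD j 0) j = some p) :
    pvT nums j = 1 + pvSeg nums (p + 1) j := by
  rw [pvT, h]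
  dsimp only
  rw [List.attach_map_val (l := List.range' (p + 1) (j - (p + 1))) (f := pvT nums)]
  rfl

lemma pvT_nonneg (nums : List Int) (j : Nat) : 0 ≤ pvT nums j := by
  rw [pvT]
  rcases hs : pvSearch nums (nums.getD j 0) j with _ | p
  · simp
  · dsimp only
    have := (PySem.List.le_foldl_max
      ((List.range' (p + 1) (j - (p + 1))).attach.map (fun k => pvT nums k.1)) 0).1
    omega

lemma pvSeg_empty (nums : List Int) (a b : Nat) (h : b ≤ a) : pvSeg nums a b = 0 := by
  unfold pvSeg
  rw [Nat.sub_eq_zero_of_le h]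
  rfl

lemma pvSeg_split (nums : List Int) (a j b : Nat) (h1 : a ≤ j) (h2 : j < b) :
    pvSeg nums a b = max (pvSeg nums a j) (max (max 0 (pvT nums j)) (pvSeg nums (j + 1) b)) := by
  have e1 : List.range' a (b - a) = List.range' a (j - a) ++ List.range' j (b - j) := by
    have h4 : b - a = (j - a) + (b - j) := by omega
    have h5 : a + 1 * (j - a) = j := by omega
    rw [h4, ← List.range'_append, h5]
  unfold pvSeg
  rw [e1, List.map_append, pvFM_append]
  have e2 : List.range' j (b - j) = j :: List.range' (j + 1) (b - j - 1) := by
    have h : b - j = (b - j - 1) + 1 := by omega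
    rw [h, List.range'_succ]
    simp
  rw [e2, List.map_cons, pvFM_cons]
  have e3 : b - j - 1 = b - (j + 1) := by omega
  rw [e3]

-- ---------- pvNge characterisation ----------

lemma pvNgeAux_spec (nums : List Int) (x : Int) :
    ∀ (fuel c : Nat),
      c ≤ pvNgeAux nums x c fuel ∧ pvNgeAux nums x c fuel ≤ c + fuel ∧
      (∀ l, c ≤ l → l < pvNgeAux nums x c fuel → nums.getD l 0 < x) ∧
      (pvNgeAux nums x c fuel < c + fuel → x ≤ nums.getD (pvNgeAux nums x c fuel) 0) := by
  intro fuel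
  induction fuel with
  | zero =>
    intro c
    refine ⟨le_rfl, by simp [pvNgeAux], ?_, ?_⟩
    · intro l h1 h2
      simp [pvNgeAux] at h2
      omega
    · intro h
      simp [pvNgeAux] at h
  | succ fuel ih =>
    intro c
    rw [pvNgeAux]
    by_cases h : x ≤ nums.getD c 0
    · rw [if_pos h]
      exact ⟨le_rfl, by omega, fun l h1 h2 => by omega, fun _ => h⟩
    · rw [if_neg h]
      obtain ⟨i1, i2, i3, i4⟩ := ih (c + 1)
      refine ⟨by omega, by omega, ?_, fun hlt => i4 (by omega)⟩
      intro l h1 h2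
      rcases Nat.lt_or_ge l (c + 1) with hc | hc
      · have he : l = c := by omega
        subst he; omega
      · exact i3 l hc h2

lemma pvNgeAux_eq (nums : List Int) (x : Int) :
    ∀ (fuel c m : Nat), c ≤ m → m ≤ c + fuel →
      (∀ l, c ≤ l → l < m → nums.getD l 0 < x) →
      (m = c + fuel ∨ x ≤ nums.getD m 0) →
      pvNgeAux nums x c fuel = m := by
  intro fuel
  induction fuel with
  | zero =>
    intro c m h1 h2 _ _
    have : m = c := by omega
    simp [pvNgeAux, this]
  | succ fuel ih =>
    intro c m h1 h2 h3 h4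
    rw [pvNgeAux]
    by_cases h : x ≤ nums.getD c 0
    · rw [if_pos h]
      by_contra hne
      exact absurd (h3 c le_rfl (by omega)) (by omega)
    · rw [if_neg h]
      have hmc : m ≠ c := by
        intro he; subst he
        rcases h4 with h4 | h4
        · omega
        · exact h h4
      refine ih (c + 1) m (by omega) (by omega)
        (fun l hl1 hl2 => h3 l (by omega) hl2) ?_
      rcases h4 with h4 | h4
      · left; omega
      · right; exact h4

lemma pvNge_spec (nums : List Int) (i : Nat) (hi : i < nums.length) :
    i < pvNge nums i ∧ pvNge nums i ≤ nums.length ∧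
    (∀ l, i < l → l < pvNge nums i → nums.getD l 0 < nums.getD i 0) ∧
    (pvNge nums i < nums.length → nums.getD i 0 ≤ nums.getD (pvNge nums i) 0) := by
  unfold pvNge
  have h := pvNgeAux_spec nums (nums.getD i 0) (nums.length - (i + 1)) (i + 1)
  have he : i + 1 + (nums.length - (i + 1)) = nums.length := by omega
  rw [he] at h
  exact ⟨by omega, h.2.1, fun l h1 h2 => h.2.2.1 l (by omega) h2, h.2.2.2⟩

lemma pvNge_eq (nums : List Int) (i m : Nat) (hi : i < nums.length)
    (h1 : i < m) (h2 : m ≤ nums.length)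
    (h3 : ∀ l, i < l → l < m → nums.getD l 0 < nums.getD i 0)
    (h4 : m = nums.length ∨ nums.getD i 0 ≤ nums.getD m 0) :
    pvNge nums i = m := by
  unfold pvNge
  have he : i + 1 + (nums.length - (i + 1)) = nums.length := by omega
  exact pvNgeAux_eq nums (nums.getD i 0) (nums.length - (i + 1)) (i + 1) m (by omega)
    (by omega) (fun l h1 h2 => h3 l (by omega) h2) (by rw [he]; exact h4)

-- ---------- maxima facts ----------

lemma pvPb_iff (nums : List Int) (w j : Nat) :
    pvPb nums w j = true ↔ ∀ i, w ≤ i → i < j → nums.getD i 0 ≤ nums.getD j 0 := by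
  unfold pvPb
  rw [List.all_eq_true]
  constructor
  · intro H i h1 h2
    have hm : i ∈ List.range' w (j - w) := List.mem_range'_1.mpr ⟨h1, by omega⟩
    exact of_decide_eq_true (H i hm)
  · intro H i hm
    have := List.mem_range'_1.mp hm
    exact decide_eq_true (H i this.1 (by omega))

lemma pvMaxima_mem (nums : List Int) (w j : Nat) :
    j ∈ pvMaxima nums w ↔
      w ≤ j ∧ j < nums.length ∧ ∀ i, w ≤ i → i < j → nums.getD i 0 ≤ nums.getD j 0 := by
  unfold pvMaxima
  rw [List.mem_filter, List.mem_range'_1, pvPb_iff]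
  constructor
  · rintro ⟨⟨h1, h2⟩, h3⟩
    exact ⟨h1, by omega, h3⟩
  · rintro ⟨h1, h2, h3⟩
    exact ⟨⟨h1, by omega⟩, h3⟩

lemma pvMaxima_pairwise_lt (nums : List Int) (w : Nat) :
    (pvMaxima nums w).Pairwise (· < ·) := by
  exact (List.pairwise_lt_range' 1).filter _

lemma pvMaxima_pairwise_le (nums : List Int) (w : Nat) :
    (pvMaxima nums w).Pairwise (fun a b => nums.getD a 0 ≤ nums.getD b 0) := by
  refine (pvMaxima_pairwise_lt nums w).imp_of_mem ?_
  intro a b ha hb hab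
  have hb' := (pvMaxima_mem nums w b).mp hb
  have ha' := (pvMaxima_mem nums w a).mp ha
  exact hb'.2.2 a ha'.1 hab

lemma pvMaxima_cons (nums : List Int) (w : Nat) (hw : w < nums.length) :
    pvMaxima nums w =
      w :: (pvMaxima nums (w + 1)).filter (fun j => nums.getD w 0 ≤ nums.getD j 0) := by
  unfold pvMaxima
  have h1 : nums.length - w = (nums.length - (w + 1)) + 1 := by omega
  rw [h1, List.range'_succ, List.filter_cons]
  have h2 : pvPb nums w w = true := by
    rw [pvPb_iff]
    intro i hi1 hi2
    omega
  rw [if_pos h2, List.filter_filter]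
  congr 1
  apply List.filter_congr
  intro j hj
  have hj' := List.mem_range'_1.mp hj
  rw [Bool.eq_iff_iff]
  rw [Bool.and_eq_true, decide_eq_true_iff, pvPb_iff, pvPb_iff]
  constructor
  · intro H
    exact ⟨H w le_rfl (by omega), fun i h1 h2 => H i (by omega) h2⟩
  · rintro ⟨hw0, H⟩ i h1 h2
    rcases Nat.lt_or_ge i (w + 1) with hc | hc
    · have he : i = w := by omega
      subst he; exact hw0
    · exact H i hc h2

-- a filtered range decomposes after its head
lemma pvFilter_cons_inv (P : Nat → Bool) (n : Nat) :
    ∀ (s j1 : Nat) (rest : List Nat),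
      (List.range' s (n - s)).filter P = j1 :: rest →
      s ≤ j1 ∧ j1 < n ∧ P j1 = true ∧
      (∀ l, s ≤ l → l < j1 → P l = false) ∧
      rest = (List.range' (j1 + 1) (n - (j1 + 1))).filter P := by
  suffices H : ∀ (fuel s j1 : Nat) (rest : List Nat), n - s = fuel →
      (List.range' s (n - s)).filter P = j1 :: rest →
      s ≤ j1 ∧ j1 < n ∧ P j1 = true ∧ (∀ l, s ≤ l → l < j1 → P l = false) ∧
      rest = (List.range' (j1 + 1) (n - (j1 + 1))).filter P by
    intro s j1 rest h
    exact H (n - s) s j1 rest rfl h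
  intro fuel
  induction fuel with
  | zero =>
    intro s j1 rest hf h
    rw [hf] at h
    simp at h
  | succ f ih =>
    intro s j1 rest hf h
    rw [hf, List.range'_succ, List.filter_cons] at h
    by_cases hp : P s
    · rw [if_pos hp] at h
      obtain ⟨he1, he2⟩ : s = j1 ∧ List.filter P (List.range' (s + 1) f) = rest := by
        constructor
        · exact (List.cons.injEq _ _ _ _ ▸ h).1
        · exact (List.cons.injEq _ _ _ _ ▸ h).2
      subst he1
      refine ⟨le_rfl, by omega, hp, fun l h1 h2 => by omega, ?_⟩
      rw [← he2]
      have hnf : n - (s + 1) = f := by omega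
      rw [hnf]
    · rw [if_neg hp] at h
      have hr : (List.range' (s + 1) (n - (s + 1))).filter P = j1 :: rest := by
        have : n - (s + 1) = f := by omega
        rw [this]; exact h
      obtain ⟨k1, k2, k3, k4, k5⟩ := ih (s + 1) j1 rest (by omega) hr
      refine ⟨by omega, k2, k3, ?_, k5⟩
      intro l h1 h2
      rcases Nat.lt_or_ge l (s + 1) with hc | hc
      · have he : l = s := by omega
        subst he
        exact Bool.eq_false_iff.mpr (by simpa using hp)
      · exact k4 l hc h2

-- filter by 'value ≥ cut' equals dropWhile 'value < cut' on a value-monotone list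
lemma pvFilterDrop (nums : List Int) (c : Int) (l : List Nat)
    (h : l.Pairwise (fun a b => nums.getD a 0 ≤ nums.getD b 0)) :
    l.filter (fun j => decide (c ≤ nums.getD j 0)) =
      l.dropWhile (fun j => decide (nums.getD j 0 < c)) := by
  induction l with
  | nil => rfl
  | cons a t ih =>
    rw [List.pairwise_cons] at h
    rw [List.filter_cons, List.dropWhile_cons]
    by_cases hc : nums.getD a 0 < c
    · rw [if_neg (by simpa using (by omega : ¬ c ≤ nums.getD a 0)), if_pos (by simpa using hc)]
      exact ih h.2
    · rw [if_pos (by simpa using (by omega : c ≤ nums.getD a 0)), if_neg (by simpa using hc)]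
      congr 1
      rw [List.filter_eq_self]
      intro b hb
      have := h.1 b hb
      exact decide_eq_true (by omega)

-- every element of the window [w+1, n) all of whose preceding maxima are < C is itself < C
lemma pvWindowLt (nums : List Int) (w : Nat) (C : Int) :
    ∀ l, w + 1 ≤ l → l < nums.length →
      (∀ a, a ∈ pvMaxima nums (w + 1) → a ≤ l → nums.getD a 0 < C) →
      nums.getD l 0 < C := by
  intro l
  induction l using Nat.strong_induction_on with
  | _ l ih =>
    intro hl1 hl2 hmax
    by_cases hm : l ∈ pvMaxima nums (w + 1)
    · exact hmax l hm le_rfl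
    · have hnPb : ¬ ∀ i, w + 1 ≤ i → i < l → nums.getD i 0 ≤ nums.getD l 0 := by
        intro hall
        exact hm ((pvMaxima_mem nums (w + 1) l).mpr ⟨hl1, hl2, hall⟩)
      push_neg at hnPb
      obtain ⟨q, hq1, hq2, hq3⟩ := hnPb
      have hq4 : nums.getD q 0 < C :=
        ih q hq2 hq1 (by omega) (fun a ha hal => hmax a ha (by omega))
      omega

lemma pvSeg_nonneg (nums : List Int) (a b : Nat) : 0 ≤ pvSeg nums a b := pvFM_nonneg _

lemma getD_replicate0 (m : Nat) : (List.replicate (10 ^ 5) (0 : Int)).getD m 0 = 0 := by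
  rcases Nat.lt_or_ge m (10 ^ 5) with h | h
  · rw [List.getD_eq_getElem _ _ (by rw [List.length_replicate]; exact h)]
    exact List.getElem_replicate _
  · rw [List.getD_eq_default _ _ (by rw [List.length_replicate]; exact h)]

-- between a maximum r and the next maximum, every value is strictly below v r
lemma pvRootLt (nums : List Int) (w r : Nat) (hr : r ∈ pvMaxima nums (w + 1)) :
    ∀ l, r < l → l < nums.length →
      (∀ a, a ∈ pvMaxima nums (w + 1) → r < a → a ≤ l → False) →
      nums.getD l 0 < nums.getD r 0 := by
  intro l
  induction l using Nat.strong_induction_on with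
  | _ l ih =>
    intro hl1 hl2 hgap
    have hrm := (pvMaxima_mem nums (w + 1) r).mp hr
    by_cases hm : l ∈ pvMaxima nums (w + 1)
    · exact (hgap l hm hl1 le_rfl).elim
    · have hnPb : ¬ ∀ i, w + 1 ≤ i → i < l → nums.getD i 0 ≤ nums.getD l 0 := by
        intro hall
        exact hm ((pvMaxima_mem nums (w + 1) l).mpr ⟨by omega, hl2, hall⟩)
      push_neg at hnPb
      obtain ⟨q, hq1, hq2, hq3⟩ := hnPb
      rcases Nat.lt_or_ge r q with hc | hc
      · have := ih q hq2 hc (by omega) (fun a ha ha1 ha2 => hgap a ha ha1 (by omega))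
        omega
      · have hqr : nums.getD q 0 ≤ nums.getD r 0 := by
          rcases Nat.eq_or_lt_of_le hc with he | hlt
          · rw [he]
          · exact hrm.2.2 q hq1 hlt
        omega

-- ---------- the pop-loop lemma (the core of the A-side proof) ----------

lemma pvPop (nums : List Int) (w : Nat) (_hw : w < nums.length) (hw5 : w < 10 ^ 5)
    (hpre : Pre_totalSteps nums) :
    ∀ (m : List Nat) (s : Nat) (dp : List Int),
      w < s →
      m = (List.range' s (nums.length - s)).filter (pvPb nums (w + 1)) →
      dp.length = 10 ^ 5 →
      (∀ i : Nat, i ≠ w → dp.getD i 0 = pvDspec nums (w + 1) i) →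
      dp.getD w 0 = pvSeg nums (w + 1) (m.headD nums.length) →
      ∃ dp',
        popA nums (w : Int) (m.map (fun (j : Nat) => (j : Int))) dp =
          ((m.dropWhile (fun j => decide (nums.getD j 0 < nums.getD w 0))).map
              (fun (j : Nat) => (j : Int)), dp') ∧
        dp'.length = 10 ^ 5 ∧
        (∀ i : Nat, i ≠ w → dp'.getD i 0 = pvDspec nums (w + 1) i) ∧
        dp'.getD w 0 =
          pvSeg nums (w + 1)
            ((m.dropWhile (fun j => decide (nums.getD j 0 < nums.getD w 0))).headD
              nums.length) := by
  intro m
  induction m with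
  | nil =>
    intro s dp hws hm hlen hspec hw0
    exact ⟨dp, rfl, hlen, hspec, by simpa using hw0⟩
  | cons j1 rest ih =>
    intro s dp hws hm hlen hspec hw0
    obtain ⟨hj1s, hj1n, hj1P, hnone, hrest⟩ :=
      pvFilter_cons_inv (pvPb nums (w + 1)) nums.length s j1 rest hm.symm
    have hj1Pb := (pvPb_iff nums (w + 1) j1).mp hj1P
    have hj1max : j1 ∈ pvMaxima nums (w + 1) :=
      (pvMaxima_mem nums (w + 1) j1).mpr ⟨by omega, hj1n, hj1Pb⟩
    rw [List.headD_cons] at hw0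
    by_cases hc : nums.getD j1 0 < nums.getD w 0
    · -- pop j1
      have hj15 : j1 < 10 ^ 5 := by
        by_contra hge
        have := hpre j1 hj1n (by omega) w (by omega)
        omega
      have hdpj1 : dp.getD j1 0 = pvReg nums j1 := by
        rw [hspec j1 (by omega)]
        unfold pvDspec
        rw [if_pos ⟨by omega, hj1n, hj15⟩]
      -- next boundary: pvNge j1 = rest.headD n
      have hbn : pvNge nums j1 = rest.headD nums.length := by
        rcases hr : rest with _ | ⟨b, rest2⟩
        · rw [List.headD_nil]
          apply pvNge_eq nums j1 nums.length hj1n (by omega) le_rfl ?_ (Or.inl rfl)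
          intro l hl1 hl2
          apply pvRootLt nums w j1 hj1max l hl1 hl2
          intro a ha ha1 ha2
          have hmem : a ∈ (List.range' (j1 + 1) (nums.length - (j1 + 1))).filter
              (pvPb nums (w + 1)) := by
            rw [List.mem_filter, List.mem_range'_1]
            have hfa := (pvMaxima_mem nums (w + 1) a).mp ha
            exact ⟨⟨by omega, by omega⟩, (pvPb_iff _ _ _).mpr hfa.2.2⟩
          rw [← hrest, hr] at hmem
          cases hmem
        · rw [List.headD_cons]
          have hrec : (List.range' (j1 + 1) (nums.length - (j1 + 1))).filter
              (pvPb nums (w + 1)) = b :: rest2 := by rw [← hrest, hr]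
          obtain ⟨hb1, hb2, hb3, hb4, _⟩ :=
            pvFilter_cons_inv (pvPb nums (w + 1)) nums.length (j1 + 1) b rest2 hrec
          have hpw : ((List.range' (j1 + 1) (nums.length - (j1 + 1))).filter
              (pvPb nums (w + 1))).Pairwise (· < ·) := (List.pairwise_lt_range' 1).filter _
          rw [hrec, List.pairwise_cons] at hpw
          apply pvNge_eq nums j1 b hj1n (by omega) (by omega) ?_
            (Or.inr ((pvPb_iff nums (w + 1) b).mp hb3 j1 (by omega) (by omega)))
          intro l hl1 hl2
          apply pvRootLt nums w j1 hj1max l hl1 (by omega)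
          intro a ha ha1 ha2
          have hmem : a ∈ (List.range' (j1 + 1) (nums.length - (j1 + 1))).filter
              (pvPb nums (w + 1)) := by
            rw [List.mem_filter, List.mem_range'_1]
            have hfa := (pvMaxima_mem nums (w + 1) a).mp ha
            exact ⟨⟨by omega, by omega⟩, (pvPb_iff _ _ _).mpr hfa.2.2⟩
          rw [hrec] at hmem
          rcases List.mem_cons.mp hmem with he | hmem2
          · omega
          · have := hpw.1 a hmem2
            omega
      -- T j1 = 1 + d
      have hT : pvT nums j1 = 1 + pvSeg nums (w + 1) j1 := by
        apply pvT_eq_succ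
        rw [pvSearch_eq_some]
        exact ⟨by omega, hc, fun l hl1 hl2 => hj1Pb l (by omega) hl2⟩
      -- the updated dp
      set val := max (dp.getD j1 0) (dp.getD w 0 + 1) with hval
      set dp2 := PySem.List.pySetD dp ((w : Nat) : Int) val with hdp2
      have hvval : val = max (pvReg nums j1) (dp.getD w 0 + 1) := by
        rw [hval, hdpj1]
      have hlen2 : dp2.length = 10 ^ 5 := by
        rw [hdp2, PySem.List.pySetD_natCast, List.length_set, hlen]
      have hget2 : ∀ i : Nat, dp2.getD i 0 = if i = w then val else dp.getD i 0 := by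
        intro i
        have h := PySem.List.pyGetD_pySetD_natCast dp w i val 0 (by omega)
        rw [PySem.List.pyGetD_natCast, PySem.List.pyGetD_natCast] at h
        rw [hdp2]
        exact h
      -- the key max algebra: dp2.getD w = pvSeg (w+1) (rest.headD n)
      have hB1 : j1 < rest.headD nums.length := by
        rcases hr : rest with _ | ⟨b, rest2⟩
        · rw [List.headD_nil]; omega
        · rw [List.headD_cons]
          have hrec : (List.range' (j1 + 1) (nums.length - (j1 + 1))).filter
              (pvPb nums (w + 1)) = b :: rest2 := by rw [← hrest, hr]
          obtain ⟨hb1, _, _, _, _⟩ :=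
            pvFilter_cons_inv (pvPb nums (w + 1)) nums.length (j1 + 1) b rest2 hrec
          omega
      have hw2 : dp2.getD w 0 = pvSeg nums (w + 1) (rest.headD nums.length) := by
        rw [hget2 w, if_pos rfl, hvval, hw0]
        rw [pvSeg_split nums (w + 1) j1 (rest.headD nums.length) (by omega) hB1]
        have hreg : pvReg nums j1 = pvSeg nums (j1 + 1) (rest.headD nums.length) := by
          unfold pvReg
          rw [hbn]
        rw [hreg, hT]
        have n1 := pvSeg_nonneg nums (w + 1) j1
        have n2 := pvSeg_nonneg nums (j1 + 1) (rest.headD nums.length)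
        omega
      -- recurse
      obtain ⟨dp', ih1, ih2, ih3, ih4⟩ := ih (j1 + 1) dp2 (by omega) hrest hlen2
        (fun i hi => by rw [hget2 i, if_neg hi]; exact hspec i hi) hw2
      refine ⟨dp', ?_, ih2, ih3, ?_⟩
      · rw [List.map_cons, popA]
        simp only [PySem.List.pyGetD_natCast]
        rw [if_pos hc]
        rw [List.dropWhile_cons_of_pos (by simpa using hc)]
        rw [← hval, ← hdp2]
        exact ih1
      · rw [List.dropWhile_cons_of_pos (by simpa using hc)]
        exact ih4
    · -- stop: j1 stays
      refine ⟨dp, ?_, hlen, hspec, ?_⟩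
      · rw [List.map_cons, popA]
        simp only [PySem.List.pyGetD_natCast]
        rw [if_neg hc]
        rw [List.dropWhile_cons_of_neg (by simpa using hc)]
        rw [List.map_cons]
      · rw [List.dropWhile_cons_of_neg (by simpa using hc), List.headD_cons]
        exact hw0

-- ---------- A-side induction ----------

lemma pvAS_succ (nums : List Int) (k : Nat) :
    pvAS nums (k + 1) = stepA nums (pvAS nums k) ((nums.length : Int) - 1 - (k : Int)) := by
  unfold pvAS
  rw [List.range_succ, List.map_append, List.foldl_append]
  rfl

lemma pvInv_zero (nums : List Int) : pvInv nums 0 := by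
  have hAS : pvAS nums 0 = ([], List.replicate (10 ^ 5) 0) := rfl
  refine ⟨?_, ?_, ?_⟩
  · rw [hAS]
    have hmx : pvMaxima nums (nums.length - 0) = [] := by
      unfold pvMaxima
      have h0 : nums.length - (nums.length - 0) = 0 := by omega
      rw [h0]
      rfl
    rw [hmx]
    rfl
  · rw [hAS]
    exact List.length_replicate
  · intro i
    rw [hAS]
    unfold pvDspec
    rw [if_neg (by omega)]
    exact getD_replicate0 i

lemma pvInv_step (nums : List Int) (k : Nat) (hk : k < nums.length)
    (hpre : Pre_totalSteps nums) (h : pvInv nums k) : pvInv nums (k + 1) := by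
  obtain ⟨h1, h2, h3⟩ := h
  have hwn : nums.length - (k + 1) < nums.length := by omega
  set w := nums.length - (k + 1) with hwdef
  have hwk : nums.length - k = w + 1 := by omega
  rw [hwk] at h1 h3
  have hcast : ((nums.length : Int) - 1 - (k : Int)) = ((w : Nat) : Int) := by omega
  unfold pvInv
  rw [pvAS_succ, hcast, ← hwdef]
  unfold stepA
  rw [h1]
  -- headD fact used by both branches
  have hhd : (pvAS nums k).2.getD w 0 =
      pvSeg nums (w + 1) ((pvMaxima nums (w + 1)).headD nums.length) := by
    rw [h3 w]
    unfold pvDspec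
    rw [if_neg (by omega)]
    rcases hmx : pvMaxima nums (w + 1) with _ | ⟨a, rest⟩
    · rw [List.headD_nil]
      by_cases hwn1 : w + 1 < nums.length
      · rw [pvMaxima_cons nums (w + 1) hwn1] at hmx
        cases hmx
      · rw [pvSeg_empty nums (w + 1) nums.length (by omega)]
    · have ha : a ∈ pvMaxima nums (w + 1) := by rw [hmx]; exact List.mem_cons_self
      have ha' := (pvMaxima_mem nums (w + 1) a).mp ha
      rw [pvMaxima_cons nums (w + 1) (by omega)] at hmx
      have he : a = w + 1 := by cases hmx; rfl
      rw [List.headD_cons, he, pvSeg_empty nums (w + 1) (w + 1) le_rfl]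
  by_cases hw5 : w < 10 ^ 5
  · obtain ⟨dp', hpa, hlen', hspec', hwv⟩ :=
      pvPop nums w hwn hw5 hpre (pvMaxima nums (w + 1)) (w + 1) (pvAS nums k).2
        (by omega) rfl h2 (fun i _ => h3 i) hhd
    have hfd : (pvMaxima nums (w + 1)).filter
          (fun j => decide (nums.getD w 0 ≤ nums.getD j 0)) =
        (pvMaxima nums (w + 1)).dropWhile
          (fun j => decide (nums.getD j 0 < nums.getD w 0)) :=
      pvFilterDrop nums (nums.getD w 0) _ (pvMaxima_pairwise_le nums (w + 1))
    refine ⟨?_, ?_, ?_⟩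
    · show (↑w :: (popA nums (↑w) ((pvMaxima nums (w + 1)).map (fun (j : Nat) => (j : Int)))
          (pvAS nums k).2).1) = _
      rw [hpa]
      rw [pvMaxima_cons nums w hwn, List.map_cons]
      congr 1
      rw [← hfd]
    · show (popA nums (↑w) ((pvMaxima nums (w + 1)).map (fun (j : Nat) => (j : Int)))
          (pvAS nums k).2).2.length = 10 ^ 5
      rw [hpa]
      exact hlen'
    · intro i
      show (popA nums (↑w) ((pvMaxima nums (w + 1)).map (fun (j : Nat) => (j : Int)))
          (pvAS nums k).2).2.getD i 0 = pvDspec nums w i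
      rw [hpa]
      by_cases hiw : i = w
      · subst hiw
        rw [hwv]
        unfold pvDspec
        rw [if_pos ⟨le_rfl, hwn, hw5⟩]
        unfold pvReg
        have hng : pvNge nums w =
            ((pvMaxima nums (w + 1)).dropWhile
              (fun j => decide (nums.getD j 0 < nums.getD w 0))).headD nums.length := by
          rcases hd : (pvMaxima nums (w + 1)).dropWhile
              (fun j => decide (nums.getD j 0 < nums.getD w 0)) with _ | ⟨b, rest2⟩
          · rw [List.headD_nil]
            apply pvNge_eq nums w nums.length hwn (by omega) le_rfl ?_ (Or.inl rfl)
            intro l hl1 hl2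
            apply pvWindowLt nums w (nums.getD w 0) l (by omega) hl2
            intro a ha hal
            have := List.dropWhile_eq_nil_iff.mp hd a ha
            exact of_decide_eq_true this
          · rw [List.headD_cons]
            rw [← hfd] at hd
            have hb : b ∈ (pvMaxima nums (w + 1)).filter
                (fun j => decide (nums.getD w 0 ≤ nums.getD j 0)) := by
              rw [hd]; exact List.mem_cons_self
            rw [List.mem_filter] at hb
            have hbm := (pvMaxima_mem nums (w + 1) b).mp hb.1
            have hbv := of_decide_eq_true hb.2
            have hpw : ((pvMaxima nums (w + 1)).filter
                (fun j => decide (nums.getD w 0 ≤ nums.getD j 0))).Pairwise (· < ·) :=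
              (pvMaxima_pairwise_lt nums (w + 1)).filter _
            rw [hd, List.pairwise_cons] at hpw
            apply pvNge_eq nums w b hwn (by omega) (by omega) ?_ (Or.inr hbv)
            intro l hl1 hl2
            apply pvWindowLt nums w (nums.getD w 0) l (by omega) (by omega)
            intro a ha hal
            by_contra hge
            push_neg at hge
            have hain : a ∈ (pvMaxima nums (w + 1)).filter
                (fun j => decide (nums.getD w 0 ≤ nums.getD j 0)) := by
              rw [List.mem_filter]
              exact ⟨ha, decide_eq_true hge⟩
            rw [hd] at hain
            rcases List.mem_cons.mp hain with he | hmem2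
            · omega
            · have := hpw.1 a hmem2
              omega
        rw [hng]
      · rw [hspec' i hiw]
        unfold pvDspec
        have hiff : (w + 1 ≤ i ∧ i < nums.length ∧ i < 10 ^ 5) ↔
            (w ≤ i ∧ i < nums.length ∧ i < 10 ^ 5) := by omega
        rw [if_congr hiff rfl rfl]
  · -- w ≥ 10^5 : the pop loop does nothing
    have hnl : ∀ j ∈ pvMaxima nums (w + 1), nums.getD w 0 ≤ nums.getD j 0 := by
      intro j hj
      have hj' := (pvMaxima_mem nums (w + 1) j).mp hj
      exact hpre j hj'.2.1 (by omega) w (by omega)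
    have hpop : popA nums (↑w) ((pvMaxima nums (w + 1)).map (fun (j : Nat) => (j : Int)))
        (pvAS nums k).2 = ((pvMaxima nums (w + 1)).map (fun (j : Nat) => (j : Int)),
          (pvAS nums k).2) := by
      rcases hmx : pvMaxima nums (w + 1) with _ | ⟨a, rest⟩
      · rfl
      · rw [List.map_cons, popA]
        simp only [PySem.List.pyGetD_natCast]
        rw [if_neg (by
          have := hnl a (by rw [hmx]; exact List.mem_cons_self)
          omega)]
    refine ⟨?_, ?_, ?_⟩
    · show (↑w :: (popA nums (↑w) ((pvMaxima nums (w + 1)).map (fun (j : Nat) => (j : Int)))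
          (pvAS nums k).2).1) = _
      rw [hpop]
      show (↑w :: (pvMaxima nums (w + 1)).map (fun (j : Nat) => (j : Int))) = _
      rw [pvMaxima_cons nums w hwn, List.map_cons]
      congr 1
      rw [List.filter_eq_self.mpr (fun a ha => decide_eq_true (hnl a ha))]
    · show (popA nums (↑w) ((pvMaxima nums (w + 1)).map (fun (j : Nat) => (j : Int)))
          (pvAS nums k).2).2.length = 10 ^ 5
      rw [hpop]
      exact h2
    · intro i
      show (popA nums (↑w) ((pvMaxima nums (w + 1)).map (fun (j : Nat) => (j : Int)))
          (pvAS nums k).2).2.getD i 0 = pvDspec nums w i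
      rw [hpop, h3 i]
      unfold pvDspec
      have hiff : (w + 1 ≤ i ∧ i < nums.length ∧ i < 10 ^ 5) ↔
          (w ≤ i ∧ i < nums.length ∧ i < 10 ^ 5) := by omega
      rw [if_congr hiff rfl rfl]

lemma pvInv_all (nums : List Int) (hpre : Pre_totalSteps nums) :
    ∀ k, k ≤ nums.length → pvInv nums k := by
  intro k
  induction k with
  | zero => intro _; exact pvInv_zero nums
  | succ k ih => intro hk; exact pvInv_step nums k (by omega) hpre (ih (by omega))

lemma totalSteps_eq (nums : List Int) :
    totalSteps nums = (PySem.List.max? (pvAS nums nums.length).2 (fun x => x)).getD 0 := by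
  unfold totalSteps pvAS
  dsimp only
  rw [PySem.List.pyRange_neg_one]
  have h1 : (((nums.length : Int) - 1) - (-1)).toNat = nums.length := by omega
  rw [h1]

lemma pvAfinal (nums : List Int) (hpre : Pre_totalSteps nums) :
    totalSteps nums = pvMaxT nums := by
  obtain ⟨h1, h2, h3⟩ := pvInv_all nums hpre nums.length le_rfl
  rw [totalSteps_eq]
  have hzero : nums.length - nums.length = 0 := by omega
  rw [hzero] at h3
  set dpn := (pvAS nums nums.length).2 with hdpn
  have hne : dpn ≠ [] := by
    intro hcon
    rw [hcon] at h2
    simp at h2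
  rcases hmax : PySem.List.max? dpn (fun x => x) with _ | m0
  · exfalso
    rcases hdp : dpn with _ | ⟨x, t⟩
    · exact hne hdp
    · rw [hdp, PySem.List.max?_id_cons] at hmax
      cases hmax
  · simp only [Option.getD_some]
    have hmem := PySem.List.max?_mem hmax
    have hisMax := PySem.List.max?_isMax hmax
    have hMTnn : 0 ≤ pvMaxT nums := pvFM_nonneg _
    have hub : m0 ≤ pvMaxT nums := by
      obtain ⟨idx, hidx, hval⟩ := List.mem_iff_getElem.mp hmem
      have hgd : dpn.getD idx 0 = m0 := by rw [List.getD_eq_getElem _ _ hidx, hval]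
      rw [h3 idx] at hgd
      unfold pvDspec at hgd
      split_ifs at hgd with hcond
      · rw [← hgd]
        unfold pvReg pvSeg
        apply pvFM_bound _ _ hMTnn
        intro x hx
        obtain ⟨l, hl, rfl⟩ := List.mem_map.mp hx
        have hlr := List.mem_range'_1.mp hl
        have hnge := pvNge_spec nums idx hcond.2.1
        unfold pvMaxT
        exact pvFM_le _ _ (List.mem_map.mpr ⟨l, List.mem_range.mpr (by omega), rfl⟩)
      · omega
    have h0m : 0 ≤ m0 := by
      have hlen0 : 0 < dpn.length := by rw [h2]; norm_num
      have hg0 : dpn.getD 0 0 = dpn[0] := List.getD_eq_getElem _ _ hlen0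
      have hmem0 : dpn[0] ∈ dpn := List.getElem_mem _
      have hle := hisMax _ hmem0
      have hnn : 0 ≤ pvDspec nums 0 0 := by
        unfold pvDspec
        split_ifs
        · exact pvSeg_nonneg _ _ _
        · exact le_rfl
      rw [h3 0] at hg0
      rw [← hg0] at hle
      omega
    have hlb : pvMaxT nums ≤ m0 := by
      unfold pvMaxT
      apply pvFM_bound _ _ h0m
      intro x hx
      obtain ⟨j, hj, rfl⟩ := List.mem_map.mp hx
      have hjn := List.mem_range.mp hj
      rcases hs : pvSearch nums (nums.getD j 0) j with _ | p
      · rw [pvT_eq_zero nums j hs]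
        exact h0m
      · have hps := (pvSearch_eq_some nums (nums.getD j 0) j p).mp hs
        have hpn : p < nums.length := by omega
        have hnge := pvNge_spec nums p hpn
        have hjlt : j < pvNge nums p := by
          by_contra hge
          push_neg at hge
          rcases Nat.eq_or_lt_of_le hge with he | hlt2
          · have hv1 := hnge.2.2.2 (by omega)
            rw [he] at hv1
            omega
          · have hv1 := hnge.2.2.2 (by omega)
            have hv2 := hps.2.2 (pvNge nums p) hnge.1 hlt2
            omega
        have hTle : pvT nums j ≤ pvReg nums p := by
          unfold pvReg pvSeg
          exact pvFM_le _ _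
            (List.mem_map.mpr ⟨j, List.mem_range'_1.mpr ⟨by omega, by omega⟩, rfl⟩)
        have hp5 : p < 10 ^ 5 := by
          by_contra hge5
          have := hpre j hjn (by omega) p (by omega)
          omega
        have hentry : dpn.getD p 0 = pvReg nums p := by
          rw [h3 p]
          unfold pvDspec
          rw [if_pos ⟨by omega, hpn, hp5⟩]
        have hplen : p < dpn.length := by rw [h2]; omega
        have hmemp : dpn.getD p 0 ∈ dpn := by
          rw [List.getD_eq_getElem _ _ hplen]
          exact List.getElem_mem _
        have hle := hisMax _ hmemp
        omega
    omega

-- ---------- B-side ----------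

lemma pvHi_none (nums : List Int) (k : Nat) : pvHi nums k = none ↔ k = 0 := by
  cases k with
  | zero => simp [pvHi]
  | succ k =>
    rw [pvHi]
    rcases h : pvHi nums k with _ | g
    · simp
    · dsimp only
      split_ifs <;> simp

lemma pvHi_ub (nums : List Int) (k : Nat) (h : Int) (hh : pvHi nums k = some h) :
    ∀ l, l < k → nums.getD l 0 ≤ h := by
  induction k generalizing h with
  | zero => cases hh
  | succ k ih =>
    rw [pvHi] at hh
    rcases hp : pvHi nums k with _ | g <;> rw [hp] at hh <;> dsimp only at hh
    · have hk0 : k = 0 := (pvHi_none nums k).mp hp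
      subst hk0
      intro l hl
      have he : l = 0 := by omega
      subst he
      have : nums.getD 0 0 = h := by cases hh; rfl
      omega
    · by_cases hc : g ≤ nums.getD k 0
      · rw [if_pos hc] at hh
        have he : nums.getD k 0 = h := by cases hh; rfl
        intro l hl
        rcases Nat.lt_or_ge l k with h1 | h1
        · have := ih g hp l h1
          omega
        · have : l = k := by omega
          subst this; omega
      · rw [if_neg hc] at hh
        have he : g = h := by cases hh; rfl
        intro l hl
        rcases Nat.lt_or_ge l k with h1 | h1
        · have := ih g hp l h1
          omega
        · have : l = k := by omega
          subst this; omega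

lemma pvHi_mem (nums : List Int) (k : Nat) (h : Int) (hh : pvHi nums k = some h) :
    ∃ l, l < k ∧ nums.getD l 0 = h := by
  induction k generalizing h with
  | zero => cases hh
  | succ k ih =>
    rw [pvHi] at hh
    rcases hp : pvHi nums k with _ | g <;> rw [hp] at hh <;> dsimp only at hh
    · have he : nums.getD k 0 = h := by cases hh; rfl
      exact ⟨k, by omega, he⟩
    · by_cases hc : g ≤ nums.getD k 0
      · rw [if_pos hc] at hh
        have he : nums.getD k 0 = h := by cases hh; rfl
        exact ⟨k, by omega, he⟩
      · rw [if_neg hc] at hh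
        have he : g = h := by cases hh; rfl
        subst he
        obtain ⟨l, hl1, hl2⟩ := ih g hp
        exact ⟨l, by omega, hl2⟩

lemma pvBS_succ (nums : List Int) (k : Nat) :
    pvBS nums (k + 1) = stepB nums (pvBS nums k) ((k : Int), nums.getD k 0) := by
  unfold pvBS
  rw [List.range_succ, List.map_append, List.foldl_append]
  rfl

lemma pvRangeNat (a len : Nat) :
    PySem.List.pyRange (a : Int) ((a + len : Nat) : Int) 1 =
      (List.range' a len).map (fun (j : Nat) => (j : Int)) := by
  induction len with
  | zero =>
    rw [PySem.List.pyRange_one_eq_nil (by omega)]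
    rfl
  | succ len ih =>
    have h1 : ((a + (len + 1) : Nat) : Int) = ((a + len : Nat) : Int) + 1 := by push_cast; ring
    rw [h1, PySem.List.pyRange_one_succ_right (by push_cast; omega), ih]
    rw [List.range'_concat]
    rw [List.map_append]
    simp

lemma pvBestLoop (nums : List Int) (k p : Nat) (hpk : p < k) :
    bestLoop ((List.range k).map (pvT nums)) ((p : Int) + 1) (k : Int) =
      pvSeg nums (p + 1) k := by
  unfold bestLoop
  have h0 : ((p : Int) + 1) = (((p + 1 : Nat)) : Int) := by push_cast; ring
  have h1 : (k : Int) = (((p + 1) + (k - (p + 1)) : Nat) : Int) := by push_cast; omega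
  rw [h0, h1, pvRangeNat (p + 1) (k - (p + 1))]
  rw [List.foldl_map]
  rw [PySem.List.foldl_congr_mem _ _
    (fun best l => max best (pvT nums l)) 0 ?_]
  · rw [← List.foldl_map]
    rfl
  · intro acc x hx
    have hxk := List.mem_range'_1.mp hx
    rw [PySem.List.pyGetD_natCast, PySem.List.getD_map_range _ _ _ _ (by omega)]
    exact pvIteMax acc (pvT nums x)

lemma pvBS_inv (nums : List Int) : ∀ k, k ≤ nums.length →
    (pvBS nums k).1 = (List.range k).map (pvT nums) ∧ (pvBS nums k).2 = pvHi nums k := by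
  intro k
  induction k with
  | zero => exact fun _ => ⟨rfl, rfl⟩
  | succ k ih =>
    intro hk
    obtain ⟨ih1, ih2⟩ := ih (by omega)
    rw [pvBS_succ]
    unfold stepB
    rw [ih2]
    rcases hH : pvHi nums k with _ | h
    · -- k = 0
      have hk0 : k = 0 := (pvHi_none nums k).mp hH
      subst hk0
      dsimp only
      constructor
      · rw [ih1]
        rw [List.range_succ, List.map_append]
        congr 1
        have h0 : pvT nums 0 = 0 := pvT_eq_zero nums 0 rfl
        simp [h0]
      · rw [pvHi, hH]
    · have hk1 : k ≠ 0 := by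
        intro he; subst he; cases hH
      dsimp only
      by_cases hc : h ≤ nums.getD k 0
      · rw [if_pos hc]
        constructor
        · rw [ih1, List.range_succ, List.map_append]
          have hn : pvSearch nums (nums.getD k 0) k = none := by
            rw [pvSearch_eq_none]
            intro l hl
            have := pvHi_ub nums k h hH l hl
            omega
          simp [pvT_eq_zero nums k hn]
        · rw [pvHi, hH]
          dsimp only
          rw [if_pos hc]
      · rw [if_neg hc]
        obtain ⟨l0, hl0, hv0⟩ := pvHi_mem nums k h hH
        rcases hs : pvSearch nums (nums.getD k 0) k with _ | p
        · exfalso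
          rw [pvSearch_eq_none] at hs
          have := hs l0 hl0
          omega
        · have hps := (pvSearch_eq_some nums (nums.getD k 0) k p).mp hs
          have htn : (((k : Nat) : Int) - 1).toNat = k - 1 := by omega
          have hfg : findGt nums (nums.getD k 0) (((k : Nat) : Int) - 1).toNat = p := by
            rw [htn]
            apply findGt_eq
            have : k - 1 + 1 = k := by omega
            rw [this]
            exact hs
          constructor
          · rw [ih1, List.range_succ, List.map_append]
            rw [hfg]
            rw [pvBestLoop nums k p hps.1]
            dsimp only
            congr 1
            have ht := pvT_eq_succ nums k p hs
            simp only [List.map_cons, List.map_nil, ht, List.cons.injEq, and_true]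
            omega
          · rw [pvHi, hH]
            dsimp only
            rw [if_neg hc]

lemma pvBfinal (nums : List Int) : totalSteps_alt nums = pvMaxT nums := by
  unfold totalSteps_alt
  have he : PySem.List.enumerate nums =
      (List.range nums.length).map (fun (j : Nat) => ((j : Int), nums.getD j 0)) := by
    rw [PySem.List.enumerate_eq_map_pyRange nums 0]
    have hl : PySem.List.len nums = (nums.length : Int) := by simp [PySem.List.len]
    rw [hl, PySem.List.pyRange_zero_natCast, List.map_map]
    apply List.map_congr_left
    intro j hj
    simp [PySem.List.pyGetD_natCast]
  rw [he]
  show PySem.List.maxD (pvBS nums nums.length).1 (fun z => z) 0 = pvMaxT nums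
  rw [(pvBS_inv nums nums.length le_rfl).1]
  have hnn : ∀ y ∈ (List.range nums.length).map (pvT nums), 0 ≤ y := by
    intro y hy
    obtain ⟨j, _, rfl⟩ := List.mem_map.mp hy
    exact pvT_nonneg nums j
  rcases hl : (List.range nums.length).map (pvT nums) with _ | ⟨x, t⟩
  · unfold pvMaxT pvFM
    rw [hl]
    rfl
  · have hx : 0 ≤ x := by
      apply hnn
      rw [hl]
      exact List.mem_cons_self
    unfold PySem.List.maxD
    rw [PySem.List.max?_id_cons]
    unfold pvMaxT pvFM
    rw [hl]
    show t.foldl max x = (x :: t).foldl max 0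
    have : (x :: t).foldl max 0 = t.foldl max (max 0 x) := rfl
    rw [this, max_eq_right hx]

-- ===== VERDICT (by name: the statement is the Claim_ definition above) =====
theorem totalSteps_spec : Claim_equal_totalSteps := by
  intro nums _hdom hpre
  unfold Spec_totalSteps
  rw [pvAfinal nums hpre, pvBfinal nums]
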